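-- pv_equiv track=rewrite | github.com/Mminy62/algorithm | 백준/Gold/1759. 암호 만들기/암호 만들기.py | check
-- ===== SOURCE A (Python) =====
-- def check(sen):
--     cnt = 0
--     flag = False
--     for i in range(len(sen)):
--         if sen[i] in ['a', 'e', 'i', 'o', 'u']:
--             flag = True
--         else:
--             cnt += 1
--
--     if cnt >= 2 and flag:
--         return True
--
--     return False
-- ===== SOURCE B (Python) =====
-- def check(sen):
--     vowel_total = sum(map(sen.count, "aeiou"))
--     return len(sen) - vowel_total >= 2 and vowel_total >= 1
-- ===== Notes on version B (the rewrite author's own statement) =====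
-- stated objective: faster
-- what changed: B inverts the traversal: instead of A's per-character Python loop with a consonant counter and a vowel flag, B loops over the five vowels, summing sen.count(v) (five C-level counting passes), and derives the consonant count arithmetically as len(sen) - vowel_total.
import Mathlib
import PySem

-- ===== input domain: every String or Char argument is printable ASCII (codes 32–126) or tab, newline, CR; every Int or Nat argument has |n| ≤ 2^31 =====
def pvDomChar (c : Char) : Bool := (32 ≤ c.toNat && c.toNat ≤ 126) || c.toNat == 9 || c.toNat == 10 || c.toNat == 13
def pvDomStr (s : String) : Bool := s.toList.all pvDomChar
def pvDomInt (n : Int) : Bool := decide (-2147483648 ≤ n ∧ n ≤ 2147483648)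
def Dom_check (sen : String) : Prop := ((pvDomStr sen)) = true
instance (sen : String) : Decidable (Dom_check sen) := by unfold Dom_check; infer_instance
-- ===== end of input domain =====

-- B inverts the traversal: it loops over the five vowels summing sen.count(v), and derives the
-- consonant count as len(sen) - vowel_total, instead of A's per-character loop with a consonant
-- counter and a vowel flag (objective: alternative).

-- vowel membership test 'c in ['a','e','i','o','u']' used by A's port
def isVowel (c : Char) : Bool := decide (c ∈ ['a', 'e', 'i', 'o', 'u'])

-- ===== PORT A =====
-- A loops over the characters, incrementing a consonant counter and setting a vowel flag.
def check (sen : String) : Bool :=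
  let st := sen.toList.foldl
    (fun (st : Int × Bool) c => if isVowel c then (st.1, true) else (st.1 + 1, st.2))
    (0, false)
  if st.1 ≥ 2 ∧ st.2 then true else false

-- ===== PORT B =====
-- B: vowel_total = sum(map(sen.count, "aeiou")); return len(sen) - vowel_total >= 2 and vowel_total >= 1
-- (sen.count(v) for a 1-char v is exact via PySem.Str.count)
def check_alt (sen : String) : Bool :=
  let vowelTotal : Int :=
    ("aeiou".toList.map (fun v => (PySem.Str.count sen (String.ofList [v]) : Int))).sum
  decide ((PySem.Str.len sen : Int) - vowelTotal ≥ 2) && decide (vowelTotal ≥ 1)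

-- ===== PRECONDITION & SPEC =====
def Spec_check (sen : String) (out : Bool) : Prop := out = check_alt sen
instance (sen : String) (out : Bool) : Decidable (Spec_check sen out) := by unfold Spec_check; infer_instance

-- ===== CLAIM (what is proved, stated in full; the proofs are below) =====
def Claim_equal_check : Prop := ∀ (sen : String), Dom_check sen → Spec_check sen (check sen)

-- ===== LEMMAS AND PROOFS =====

-- str.count with a single-character needle is the character count
theorem count_go_single (c : Char) (l : List Char) (fuel acc : Nat)
    (h : l.length ≤ fuel) :
    PySem.Chars.count.go [c] fuel l acc = acc + l.count c := by
  induction l generalizing fuel acc with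
  | nil => cases fuel <;> simp [PySem.Chars.count.go]
  | cons x xs ih =>
    cases fuel with
    | zero => simp at h
    | succ n =>
      simp only [List.length_cons, Nat.succ_le_succ_iff] at h
      by_cases hx : c = x
      · subst hx
        rw [PySem.Chars.count.go]
        simp [List.isPrefixOf, ih _ _ h, List.count_cons]
        omega
      · have hpre : ([c].isPrefixOf (x :: xs)) = false := by
          simp [List.isPrefixOf]
          exact fun hxc => hx hxc
        rw [PySem.Chars.count.go, hpre]
        simp only [Bool.false_eq_true, if_false]
        rw [ih _ _ h]
        simp [List.count_cons]
        exact fun h2 => hx h2.symm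

theorem count_single (l : List Char) (c : Char) :
    PySem.Chars.count l [c] = l.count c := by
  rw [PySem.Chars.count]
  simp [count_go_single c l l.length 0 le_rfl]

theorem sum_ite_count (x : Char) (vs : List Char) :
    (vs.map (fun v => (if x = v then (1 : Int) else 0))).sum = (vs.count x : Int) := by
  induction vs with
  | nil => simp
  | cons w wt ih =>
    rw [List.map_cons, List.sum_cons, ih, List.count_cons]
    by_cases h : x = w
    · simp [h]; omega
    · simp [h]; exact fun h2 => h h2.symm

theorem sum_counts_cons (vs : List Char) (x : Char) (xs : List Char) :
    (vs.map (fun v => ((x :: xs).count v : Int))).sum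
      = (vs.map (fun v => (xs.count v : Int))).sum + (vs.count x : Int) := by
  have hc : ∀ v : Char,
      ((x :: xs).count v : Int) = (xs.count v : Int) + (if x = v then 1 else 0) := by
    intro v
    by_cases h : v = x
    · simp [List.count_cons, h]
    · simp [List.count_cons, h, Ne.symm h]
  simp only [hc]
  rw [← sum_ite_count x vs]
  induction vs with
  | nil => simp
  | cons w wt ih => simp [ih]; ring

theorem count_vowelList (x : Char) :
    ((['a', 'e', 'i', 'o', 'u'] : List Char).count x : Int)
      = if isVowel x then 1 else 0 := by
  by_cases h1 : x = 'a' <;> by_cases h2 : x = 'e' <;> by_cases h3 : x = 'i' <;>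
    by_cases h4 : x = 'o' <;> by_cases h5 : x = 'u' <;>
    simp_all [isVowel, List.count_cons, eq_comm]

theorem vowel_sum_eq_filter (l : List Char) :
    ((['a', 'e', 'i', 'o', 'u'] : List Char).map (fun v => (l.count v : Int))).sum
      = ((l.filter isVowel).length : Int) := by
  induction l with
  | nil => simp
  | cons x xs ih =>
    rw [sum_counts_cons, ih, count_vowelList]
    cases hx : isVowel x <;> simp [hx] <;> push_cast <;> ring

theorem check_fold_inv (l : List Char) (c0 : Int) (b0 : Bool) :
    l.foldl (fun (st : Int × Bool) c => if isVowel c then (st.1, true) else (st.1 + 1, st.2))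
      (c0, b0)
    = (c0 + ((l.filter (fun c => !isVowel c)).length : Int), b0 || l.any isVowel) := by
  induction l generalizing c0 b0 with
  | nil => simp
  | cons x xs ih =>
    cases hx : isVowel x <;> simp [hx, ih] <;> push_cast <;> ring

theorem filter_len_split (l : List Char) :
    (l.filter (fun c => !isVowel c)).length + (l.filter isVowel).length = l.length := by
  induction l with
  | nil => simp
  | cons x xs ih =>
    cases hx : isVowel x <;> simp [hx] <;> omega

theorem any_iff_filter_pos (l : List Char) :
    l.any isVowel = decide (1 ≤ (l.filter isVowel).length) := by
  induction l with
  | nil => simp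
  | cons x xs ih =>
    cases hx : isVowel x <;> simp [hx, ih]

-- ===== VERDICT (by name: the statement is the Claim_ definition above) =====
theorem check_spec : Claim_equal_check := by
  intro sen _
  unfold Spec_check check check_alt
  rw [check_fold_inv]
  have hb : ("aeiou".toList.map (fun v => (PySem.Str.count sen (String.ofList [v]) : Int))).sum
      = ((sen.toList.filter isVowel).length : Int) := by
    have h5 : "aeiou".toList = ['a', 'e', 'i', 'o', 'u'] := by decide
    rw [h5]
    have hcnt : ∀ v : Char,
        (PySem.Str.count sen (String.ofList [v]) : Int) = (sen.toList.count v : Int) := by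
      intro v
      simp [PySem.Str.count_eq, count_single]
    simp only [hcnt]
    exact vowel_sum_eq_filter sen.toList
  rw [hb]
  have h := filter_len_split sen.toList
  rw [any_iff_filter_pos]
  set v := (sen.toList.filter isVowel).length with hv
  set w := (sen.toList.filter (fun c => !isVowel c)).length with hw
  have hlen : (PySem.Str.len sen : Int) = ((w + v : Nat) : Int) := by
    have h4 : sen.toList.length = sen.length := by simp
    simp only [PySem.Str.len_eq]
    omega
  simp only [zero_add, hlen]
  by_cases h1 : ((w : Int)) ≥ 2 <;> by_cases h3 : 1 ≤ v <;>
    simp [h1, h3] <;> push_cast <;> omega
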